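-- pv_equiv track=rewrite | github.com/ammarhere02/Ai-PowerPoint | main2.py | _process_text_formatting
-- ===== SOURCE A (Python) =====
-- def _process_text_formatting(text):
--     """Process text to apply formatting patterns like **bold**"""
--     # Check if the text contains bold pattern
--     if "**" in text:
--         # Extract text between ** markers
--         parts = []
--         is_bold = False
--         current_part = ""
--
--         i = 0
--         while i < len(text):
--             if i + 1 < len(text) and text[i:i+2] == "**":
--                 # Found a bold marker, toggle bold state
--                 parts.append((current_part, is_bold))
--                 current_part = ""
--                 is_bold = not is_bold
--                 i += 2
--             else:
--                 current_part += text[i]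
--                 i += 1
--
--         # Add the last part
--         if current_part:
--             parts.append((current_part, is_bold))
--
--         return parts
--     else:
--         # No special formatting, return as regular text
--         return [(text, False)]
-- ===== SOURCE B (Python) =====
-- def _process_text_formatting(text):
--     if "**" in text:
--         segments = text.split("**")
--         parts = []
--         last = len(segments) - 1
--         for j, seg in enumerate(segments):
--             if j < last or seg:
--                 parts.append((seg, j % 2 == 1))
--         return parts
--     else:
--         return [(text, False)]
-- ===== Notes on version B (the rewrite author's own statement) =====
-- stated objective: simpler
-- what changed: Replaced the index-based character scan with toggling bold state and string accumulation by a single split on '**' followed by one enumerate pass that assigns bold by segment parity (odd index = bold), dropping only a trailing empty segment.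
import Mathlib
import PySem

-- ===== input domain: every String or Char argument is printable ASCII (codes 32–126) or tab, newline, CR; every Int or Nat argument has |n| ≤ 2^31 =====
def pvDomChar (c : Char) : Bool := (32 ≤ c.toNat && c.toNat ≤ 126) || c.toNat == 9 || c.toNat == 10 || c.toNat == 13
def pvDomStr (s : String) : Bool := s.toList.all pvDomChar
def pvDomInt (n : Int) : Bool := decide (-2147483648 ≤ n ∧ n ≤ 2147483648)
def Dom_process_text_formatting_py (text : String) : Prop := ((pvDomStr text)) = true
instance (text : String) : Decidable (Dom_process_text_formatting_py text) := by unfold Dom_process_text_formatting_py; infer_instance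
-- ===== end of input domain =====

-- B replaces A's index-based scan with one split on "**" and a parity-indexed pass: simpler.

-- ===== PORT A =====
-- the while loop: at each position, if the next two chars are "**" flush the
-- current part and toggle bold; otherwise append the char to the current part.
def aLoop : List Char → Bool → List Char → List (String × Bool) → List (String × Bool)
  | [], b, cur, parts => if cur = [] then parts else parts ++ [(String.mk cur, b)]
  | c :: rest, b, cur, parts =>
    if c = '*' ∧ rest.head? = some '*' then
      aLoop rest.tail (!b) [] (parts ++ [(String.mk cur, b)])
    else
      aLoop rest b (cur ++ [c]) parts
termination_by l _ _ _ => l.length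
decreasing_by all_goals (simp [List.length_tail]; try omega)

def process_text_formatting_py (text : String) : List (String × Bool) :=
  if PySem.Str.isIn "**" text then aLoop text.toList false [] []
  else [(text, false)]

-- ===== PORT B =====
-- the 'for j, seg in enumerate(segments)' loop of Source B, carrying the index j
def bLoop (L : Nat) : Nat → List (List Char) → List (String × Bool) → List (String × Bool)
  | _, [], parts => parts
  | j, seg :: rest, parts =>
    bLoop L (j + 1) rest
      (if j < L - 1 ∨ seg ≠ [] then parts ++ [(String.mk seg, decide (j % 2 = 1))] else parts)

def process_text_formatting_py_alt (text : String) : List (String × Bool) :=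
  if PySem.Str.isIn "**" text then
    let segments := PySem.Chars.splitOn text.toList ['*', '*']
    bLoop segments.length 0 segments []
  else [(text, false)]

-- ===== PRECONDITION & SPEC =====
def Spec_process_text_formatting_py (text : String) (out : List (String × Bool)) : Prop := out = process_text_formatting_py_alt text
instance (text : String) (out : List (String × Bool)) : Decidable (Spec_process_text_formatting_py text out) := by unfold Spec_process_text_formatting_py; infer_instance

-- ===== CLAIM (what is proved, stated in full; the proofs are below) =====
def Claim_equal_process_text_formatting_py : Prop := ∀ (text : String), Dom_process_text_formatting_py text → Spec_process_text_formatting_py text (process_text_formatting_py text)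

-- ===== LEMMAS AND PROOFS =====

-- reference splitter: same recursion shape as aLoop, no accumulators
def mySplit : List Char → List (List Char)
  | [] => [[]]
  | c :: rest =>
    if c = '*' ∧ rest.head? = some '*' then [] :: mySplit rest.tail
    else
      match mySplit rest with
      | [] => [[]]
      | s :: ss => (c :: s) :: ss
termination_by l => l.length
decreasing_by all_goals (simp [List.length_tail]; try omega)

-- prepend a prefix onto the first segment
def consHead (pre : List Char) : List (List Char) → List (List Char)
  | [] => [pre]
  | s :: ss => (pre ++ s) :: ss

-- reference builder: alternate the bold flag along the segments, drop a trailing empty one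
def bBuild : Bool → List (List Char) → List (String × Bool)
  | _, [] => []
  | b, [s] => if s = [] then [] else [(String.mk s, b)]
  | b, s :: ss => (String.mk s, b) :: bBuild (!b) ss

theorem mySplit_ne_nil (l : List Char) : mySplit l ≠ [] := by
  unfold mySplit
  split
  · simp
  · split
    · simp
    · split <;> simp

theorem consHead_nil (ss : List (List Char)) (h : ss ≠ []) : consHead [] ss = ss := by
  cases ss with
  | nil => exact absurd rfl h
  | cons s t => simp [consHead]

theorem bBuild_cons_cons (b : Bool) (s t : List Char) (ss : List (List Char)) :
    bBuild b (s :: t :: ss) = (String.mk s, b) :: bBuild (!b) (t :: ss) := rfl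

theorem prefix_star_iff (c : Char) (rest : List Char) :
    (List.isPrefixOf ['*', '*'] (c :: rest) = true) ↔ (c = '*' ∧ rest.head? = some '*') := by
  cases rest <;> simp [List.isPrefixOf] <;> tauto

theorem mySplit_marker (c : Char) (rest : List Char) (h : c = '*' ∧ rest.head? = some '*') :
    mySplit (c :: rest) = [] :: mySplit rest.tail := by
  rw [mySplit]; simp [h]

theorem mySplit_plain (c : Char) (rest : List Char) (h : ¬ (c = '*' ∧ rest.head? = some '*')) :
    mySplit (c :: rest) = match mySplit rest with
      | [] => [[]]
      | s :: ss => (c :: s) :: ss := by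
  rw [mySplit]; simp [h]

theorem go_eq_mySplit : ∀ (fuel : Nat) (l cur : List Char) (acc : List (List Char)),
    l.length ≤ fuel →
    PySem.Chars.splitOn.go ['*', '*'] fuel l cur acc = acc.reverse ++ consHead cur.reverse (mySplit l) := by
  intro fuel
  induction fuel with
  | zero =>
    intro l cur acc h
    have hl : l = [] := by cases l with | nil => rfl | cons a t => simp at h
    subst hl
    simp [PySem.Chars.splitOn.go, mySplit, consHead]
  | succ fuel ih =>
    intro l cur acc h
    cases l with
    | nil => simp [PySem.Chars.splitOn.go, mySplit, consHead]
    | cons c rest =>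
      rw [PySem.Chars.splitOn.go]
      by_cases hp : c = '*' ∧ rest.head? = some '*'
      · have hpre : List.isPrefixOf ['*', '*'] (c :: rest) = true := (prefix_star_iff c rest).mpr hp
        rw [if_pos hpre]
        have hdrop : List.drop (['*', '*'] : List Char).length (c :: rest) = rest.tail := by
          cases rest <;> simp
        rw [hdrop, ih rest.tail [] (cur.reverse :: acc)
              (by cases rest with | nil => simp | cons t rs => simp at h ⊢; omega)]
        rw [mySplit_marker c rest hp]
        cases hms : mySplit rest.tail with
        | nil => exact absurd hms (mySplit_ne_nil _)
        | cons s ss => simp [consHead]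
      · have hpre : List.isPrefixOf ['*', '*'] (c :: rest) = false := by
          rw [Bool.eq_false_iff]; intro hc; exact hp ((prefix_star_iff c rest).mp hc)
        rw [if_neg (by simp [hpre])]
        rw [ih rest (c :: cur) acc (by simp at h; omega)]
        rw [mySplit_plain c rest hp]
        cases hms : mySplit rest with
        | nil => exact absurd hms (mySplit_ne_nil rest)
        | cons s ss => simp [consHead]

theorem aLoop_eq_bBuild (l : List Char) (b : Bool) (cur : List Char) (parts : List (String × Bool)) :
    aLoop l b cur parts = parts ++ bBuild b (consHead cur (mySplit l)) := by
  cases l with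
  | nil =>
    rw [aLoop, mySplit]
    simp only [consHead, List.append_nil]
    by_cases hc : cur = [] <;> simp [hc, bBuild]
  | cons c rest =>
    by_cases hp : c = '*' ∧ rest.head? = some '*'
    · rw [aLoop, if_pos hp, aLoop_eq_bBuild rest.tail (!b) [] _]
      rw [mySplit_marker c rest hp, consHead_nil _ (mySplit_ne_nil _)]
      cases hms : mySplit rest.tail with
      | nil => exact absurd hms (mySplit_ne_nil _)
      | cons s ss => simp [consHead, bBuild_cons_cons]
    · rw [aLoop, if_neg hp, aLoop_eq_bBuild rest b (cur ++ [c]) parts]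
      rw [mySplit_plain c rest hp]
      cases hms : mySplit rest with
      | nil => exact absurd hms (mySplit_ne_nil _)
      | cons s ss => simp [consHead]
termination_by l.length
decreasing_by all_goals (simp [List.length_tail]; try omega)

theorem not_decide_parity (n : Nat) : (!decide (n % 2 = 1)) = decide ((n + 1) % 2 = 1) := by
  rcases Nat.mod_two_eq_zero_or_one n with h | h <;> simp [Nat.add_mod, h]

theorem bLoop_eq_bBuild : ∀ (ss : List (List Char)) (L n : Nat) (parts : List (String × Bool)),
    n + ss.length = L →
    bLoop L n ss parts = parts ++ bBuild (decide (n % 2 = 1)) ss := by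
  intro ss
  induction ss with
  | nil => intro L n parts h; simp [bLoop, bBuild]
  | cons seg rest ih =>
    intro L n parts h
    rw [bLoop, ih L (n + 1) _ (by simp at h ⊢; omega)]
    cases rest with
    | nil =>
      have hn : ¬ n < L - 1 := by simp at h; omega
      by_cases hseg : seg = [] <;> simp [hn, hseg, bBuild]
    | cons t rs =>
      have hn : n < L - 1 := by simp at h; omega
      rw [if_pos (Or.inl hn), bBuild_cons_cons, not_decide_parity]
      simp

-- ===== VERDICT (by name: the statement is the Claim_ definition above) =====
theorem process_text_formatting_py_spec : Claim_equal_process_text_formatting_py := by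
  intro text _
  unfold Spec_process_text_formatting_py process_text_formatting_py process_text_formatting_py_alt
  split
  · rw [aLoop_eq_bBuild, bLoop_eq_bBuild _ _ 0 _ (by omega)]
    have hs : PySem.Chars.splitOn text.toList ['*', '*'] = mySplit text.toList := by
      unfold PySem.Chars.splitOn
      rw [go_eq_mySplit _ _ _ _ (by omega)]
      simp [consHead_nil _ (mySplit_ne_nil _)]
    rw [hs, consHead_nil _ (mySplit_ne_nil _)]
    simp
  · rfl
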